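-- pv_equiv track=rewrite | github.com/Debkumarkatwa/Sabudh-Internship-Workflow | Python/Week 1/Lists.py | Extract_Consecutive
-- ===== SOURCE A (Python) =====
-- def Extract_Consecutive(List:list, n:int) -> list:
--     if not List or n <= 0:
--         return []
--
--     result = []
--     count = 1
--
--     for i in range(1, len(List)):
--         if List[i] == List[i - 1]:
--             count += 1
--         else:
--             if count == n:
--                 result.append(List[i - 1])
--             count = 1
--
--     if count == n:   # Checking the last one
--         result.append(List[-1])
--
--     return result
-- ===== SOURCE B (Python) =====
-- def Extract_Consecutive(List: list, n: int) -> list: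
--     if not List or n <= 0:
--         return []
--     m = len(List)
--     # staged approach: first compute the indices where a new run starts,
--     # then filter adjacent boundary pairs whose gap is exactly n
--     starts = [i for i in range(m) if i == 0 or List[i] != List[i - 1]]
--     starts.append(m)
--     return [List[s] for s, e in zip(starts, starts[1:]) if e - s == n]
-- ===== Notes on version B (the rewrite author's own statement) =====
-- stated objective: alternative
-- what changed: B works in two staged passes over run-boundary indices: it first lists the positions where a new run starts, appends the length as a sentinel, and then keeps the value at each start whose gap to the next boundary is exactly n, instead of A's streaming counter with an on-change flush and a separate final-run check.
import Mathlib
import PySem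

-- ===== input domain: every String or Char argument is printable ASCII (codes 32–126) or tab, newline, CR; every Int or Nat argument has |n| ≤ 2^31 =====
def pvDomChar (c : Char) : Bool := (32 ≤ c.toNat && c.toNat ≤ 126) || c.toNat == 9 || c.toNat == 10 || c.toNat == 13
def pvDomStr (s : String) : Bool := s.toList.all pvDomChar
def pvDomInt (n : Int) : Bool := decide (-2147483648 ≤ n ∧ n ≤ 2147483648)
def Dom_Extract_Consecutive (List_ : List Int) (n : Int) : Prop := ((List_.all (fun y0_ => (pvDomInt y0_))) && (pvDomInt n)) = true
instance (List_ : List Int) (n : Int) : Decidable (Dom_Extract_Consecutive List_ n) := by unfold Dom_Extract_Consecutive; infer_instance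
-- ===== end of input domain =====

-- B replaces A's streaming counter (with on-change flush and final-run check) by two staged
-- passes over run-boundary indices: list the start index of every run, append the length as a
-- sentinel, keep each start whose gap to the next boundary is exactly n; objective: alternative.

-- ===== PORT A =====
def Extract_Consecutive (List_ : List Int) (n : Int) : List Int :=
  if List_ = [] ∨ n ≤ 0 then []
  else
    let st := (PySem.List.pyRange 1 (List_.length : Int) 1).foldl
      (fun (s : List Int × Int) (i : Int) =>
        if PySem.List.pyGetD List_ i 0 = PySem.List.pyGetD List_ (i - 1) 0 then
          (s.1, s.2 + 1)
        else
          ((if s.2 = n then s.1 ++ [PySem.List.pyGetD List_ (i - 1) 0] else s.1), 1))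
      ([], 1)
    if st.2 = n then st.1 ++ [PySem.List.pyGetD List_ (-1) 0] else st.1

-- ===== PORT B =====
def Extract_Consecutive_alt (List_ : List Int) (n : Int) : List Int :=
  if List_ = [] ∨ n ≤ 0 then []
  else
    let m : Int := (List_.length : Int)
    -- starts = [i for i in range(m) if i == 0 or List[i] != List[i-1]]; starts.append(m)
    let starts : List Int :=
      ((PySem.List.pyRange 0 m 1).filter
        (fun i => i == 0 || !(PySem.List.pyGetD List_ i 0 == PySem.List.pyGetD List_ (i - 1) 0)))
      ++ [m]
    -- [List[s] for s, e in zip(starts, starts[1:]) if e - s == n]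
    ((starts.zip starts.tail).filter (fun p => p.2 - p.1 == n)).map
      (fun p => PySem.List.pyGetD List_ p.1 0)

-- ===== PRECONDITION & SPEC =====
def Spec_Extract_Consecutive (List_ : List Int) (n : Int) (out : List Int) : Prop := out = Extract_Consecutive_alt List_ n
instance (List_ : List Int) (n : Int) (out : List Int) : Decidable (Spec_Extract_Consecutive List_ n out) := by unfold Spec_Extract_Consecutive; infer_instance

-- ===== CLAIM (what is proved, stated in full; the proofs are below) =====
def Claim_equal_Extract_Consecutive : Prop := ∀ (List_ : List Int) (n : Int), Dom_Extract_Consecutive List_ n → Spec_Extract_Consecutive List_ n (Extract_Consecutive List_ n)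

-- ===== LEMMAS AND PROOFS =====

-- Reference run-length encoding of prev-run (prev, cnt) followed by the rest of the list.
def rleAux (prev cnt : Int) : List Int → List (Int × Int)
  | [] => [(prev, cnt)]
  | x :: t => if prev = x then rleAux prev (cnt + 1) t else (prev, cnt) :: rleAux x 1 t

-- values of runs of length exactly n (the common reference both programs are reduced to)
def rleTop (L : List Int) (n : Int) : List Int :=
  match L with
  | [] => []
  | x :: t => ((rleAux x 1 t).filter (fun p => p.2 = n)).map Prod.fst

-- ---- B-side reference (Nat indices) ----
def pvCond (L : List Int) (i : Nat) : Bool := i == 0 || !(L.getD i 0 == L.getD (i - 1) 0)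
def pvS (L : List Int) : List Nat := (List.range L.length).filter (pvCond L)
def pvAug (L : List Int) : List Nat := pvS L ++ [L.length]
def pvBN (L : List Int) (n : Int) : List Int :=
  (((pvAug L).zip (pvAug L).tail).filter (fun p => ((p.2 : Int) - (p.1 : Int) == n))).map
    (fun p => L.getD p.1 0)

-- first run length / remainder
def pvK (x : Int) (t : List Int) : Nat := (t.takeWhile (fun y => y == x)).length
def pvR (x : Int) (t : List Int) : List Int := t.dropWhile (fun y => y == x)

theorem pvGetD_le_k (x : Int) (t : List Int) (i : Nat) (h : i ≤ pvK x t) :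
    (x :: t).getD i 0 = x := by
  match i, h with
  | 0, _ => simp
  | j+1, h =>
    have hj : j < (t.takeWhile (fun y => y == x)).length := by unfold pvK at h; omega
    have hval : (t.takeWhile (fun y => y == x))[j] = x := by
      simpa using List.mem_takeWhile_imp (l := t) (p := fun y => y == x) (List.getElem_mem hj)
    have ht : t.getD j 0 = x := by
      conv_lhs => rw [← List.takeWhile_append_dropWhile (p := fun y => y == x) (l := t)]
      rw [List.getD_eq_getElem?_getD, List.getElem?_append_left hj, List.getElem?_eq_getElem hj, hval]
      rfl
    simpa [List.getD_eq_getElem?_getD] using ht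

theorem pvGetD_shift (x : Int) (t : List Int) (j : Nat) :
    (x :: t).getD (pvK x t + 1 + j) 0 = (pvR x t).getD j 0 := by
  have hsplit : (x :: t) = (x :: t.takeWhile (fun y => y == x)) ++ pvR x t := by
    simp [pvR]
  have hlen : (x :: t.takeWhile (fun y => y == x)).length = pvK x t + 1 := by simp [pvK]
  rw [hsplit, List.getD_eq_getElem?_getD,
    List.getElem?_append_right (by omega : (x :: t.takeWhile (fun y => y == x)).length ≤ pvK x t + 1 + j)]
  rw [List.getD_eq_getElem?_getD]
  have : pvK x t + 1 + j - (x :: t.takeWhile (fun y => y == x)).length = j := by rw [hlen]; omega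
  rw [this]

theorem pvR_head (x : Int) (t : List Int) (h : pvR x t ≠ []) :
    ¬ (pvR x t).getD 0 0 = x := by
  induction t with
  | nil => simp [pvR] at h
  | cons z t2 ih =>
    by_cases hz : (z == x) = true
    · have : pvR x (z :: t2) = pvR x t2 := by simp [pvR, hz]
      rw [this] at h ⊢
      exact ih h
    · have : pvR x (z :: t2) = z :: t2 := by simp [pvR, hz]
      rw [this]
      simpa using hz

theorem pvLen_split (x : Int) (t : List Int) :
    (x :: t).length = (pvK x t + 1) + (pvR x t).length := by
  have : (t.takeWhile (fun y => y == x)).length + (t.dropWhile (fun y => y == x)).length = t.length := by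
    rw [← List.length_append, List.takeWhile_append_dropWhile]
  simp only [List.length_cons, pvK, pvR]
  omega

theorem pvS_run (x : Int) (t : List Int) :
    pvS (x :: t) = 0 :: (pvS (pvR x t)).map (fun j => pvK x t + 1 + j) := by
  unfold pvS
  rw [show (x :: t).length = (pvK x t + 1) + (pvR x t).length from pvLen_split x t,
      List.range_add, List.filter_append]
  have h1 : (List.range (pvK x t + 1)).filter (pvCond (x :: t)) = [0] := by
    rw [List.range_succ_eq_map, List.filter_cons]
    have h0 : pvCond (x :: t) 0 = true := by simp [pvCond]
    rw [List.filter_map]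
    have hnil : (List.range (pvK x t)).filter (pvCond (x :: t) ∘ Nat.succ) = [] := by
      rw [List.filter_eq_nil_iff]
      intro j hj
      have hj' : j < pvK x t := List.mem_range.mp hj
      simp only [Function.comp_apply, pvCond]
      have e1 : (x :: t).getD (j + 1) 0 = x := pvGetD_le_k x t (j + 1) (by omega)
      have e2 : (x :: t).getD (j + 1 - 1) 0 = x := by
        simpa using pvGetD_le_k x t j (by omega)
      rw [e1, e2]
      simp
    rw [hnil, h0]
    simp
  have h2 : ((List.range (pvR x t).length).map (fun j => pvK x t + 1 + j)).filter (pvCond (x :: t))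
      = (pvS (pvR x t)).map (fun j => pvK x t + 1 + j) := by
    rw [List.filter_map]
    congr 1
    rw [pvS]
    apply List.filter_congr
    intro j hj
    have hjlt : j < (pvR x t).length := List.mem_range.mp hj
    simp only [Function.comp_apply]
    cases j with
    | zero =>
      have hr : pvR x t ≠ [] := by intro e; rw [e] at hjlt; simp at hjlt
      have e1 : (x :: t).getD (pvK x t + 1 + 0) 0 = (pvR x t).getD 0 0 := pvGetD_shift x t 0
      have e2 : (x :: t).getD (pvK x t + 1 + 0 - 1) 0 = x := by
        simpa using pvGetD_le_k x t (pvK x t) le_rfl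
      have hne : ((pvR x t).getD 0 0 == x) = false := beq_eq_false_iff_ne.mpr (pvR_head x t hr)
      simp only [pvCond, e1, e2]
      rw [hne]
      simp
    | succ j' =>
      have e1 : (x :: t).getD (pvK x t + 1 + (j' + 1)) 0 = (pvR x t).getD (j' + 1) 0 :=
        pvGetD_shift x t (j' + 1)
      have e2 : (x :: t).getD (pvK x t + 1 + (j' + 1) - 1) 0 = (pvR x t).getD j' 0 := by
        have := pvGetD_shift x t j'
        have e : pvK x t + 1 + (j' + 1) - 1 = pvK x t + 1 + j' := by omega
        rw [e, this]
      simp only [pvCond, e1, e2]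
      simp
  rw [h1, h2]
  rfl

theorem pvAug_run (x : Int) (t : List Int) :
    pvAug (x :: t) = 0 :: (pvAug (pvR x t)).map (fun j => pvK x t + 1 + j) := by
  unfold pvAug
  rw [pvS_run, pvLen_split x t]
  simp [List.map_append]

theorem pvAug_cons (L : List Int) : ∃ u, pvAug L = 0 :: u := by
  cases L with
  | nil => exact ⟨[], by simp [pvAug, pvS]⟩
  | cons x t => exact ⟨_, pvAug_run x t⟩

theorem pvBN_run (x : Int) (t : List Int) (n : Int) :
    pvBN (x :: t) n = (if ((pvK x t + 1 : Nat) : Int) = n then [x] else []) ++ pvBN (pvR x t) n := by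
  obtain ⟨u, hu⟩ := pvAug_cons (pvR x t)
  have hzip : (pvAug (x :: t)).zip (pvAug (x :: t)).tail
      = (0, pvK x t + 1 + 0) ::
        (((pvAug (pvR x t)).map (fun j => pvK x t + 1 + j)).zip
          (((pvAug (pvR x t)).map (fun j => pvK x t + 1 + j)).tail)) := by
    rw [pvAug_run x t]
    conv_lhs => rw [hu]
    conv_rhs => rw [hu]
    simp [List.zip_cons_cons]
  have hmapzip : (((pvAug (pvR x t)).map (fun j => pvK x t + 1 + j)).zip
        (((pvAug (pvR x t)).map (fun j => pvK x t + 1 + j)).tail))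
      = ((pvAug (pvR x t)).zip (pvAug (pvR x t)).tail).map
          (Prod.map (fun j => pvK x t + 1 + j) (fun j => pvK x t + 1 + j)) := by
    rw [← List.map_tail, List.zip_map]
  rw [pvBN, hzip, hmapzip, List.filter_cons]
  have hpred : ((fun p : Nat × Nat => ((p.2 : Int) - (p.1 : Int) == n)) ∘
        Prod.map (fun j => pvK x t + 1 + j) (fun j => pvK x t + 1 + j))
      = (fun p : Nat × Nat => ((p.2 : Int) - (p.1 : Int) == n)) := by
    funext p
    cases p with
    | mk a b =>
      simp only [Function.comp_apply, Prod.map]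
      have : ((pvK x t + 1 + b : Nat) : Int) - ((pvK x t + 1 + a : Nat) : Int)
          = (b : Int) - (a : Int) := by push_cast; ring
      rw [this]
  rw [List.filter_map, hpred]
  have hval : ((fun p : Nat × Nat => (x :: t).getD p.1 0) ∘
        Prod.map (fun j => pvK x t + 1 + j) (fun j => pvK x t + 1 + j))
      = (fun p : Nat × Nat => (pvR x t).getD p.1 0) := by
    funext p
    cases p with
    | mk a b =>
      simp only [Function.comp_apply, Prod.map]
      exact pvGetD_shift x t a
  have hhead : ((((0, pvK x t + 1 + 0) : Nat × Nat).2 : Int) - (((0, pvK x t + 1 + 0) : Nat × Nat).1 : Int) == n)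
      = (((pvK x t + 1 : Nat) : Int) == n) := by
    norm_num
  rw [hhead]
  by_cases hn : ((pvK x t + 1 : Nat) : Int) = n
  · rw [if_pos (by simpa using hn), if_pos hn]
    simp only [List.map_cons, List.map_map, hval, pvBN]
    simp
  · rw [if_neg (by simpa using hn), if_neg hn]
    simp only [List.map_map, hval, pvBN]
    simp

theorem rle_split (x : Int) (t : List Int) : ∀ c : Int,
    rleAux x c t = (x, c + (pvK x t : Int)) ::
      (match pvR x t with | [] => [] | y :: t' => rleAux y 1 t') := by
  induction t with
  | nil => intro c; simp [rleAux, pvK, pvR]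
  | cons z t2 ih =>
    intro c
    by_cases hz : x = z
    · subst hz
      have hk : pvK x (x :: t2) = pvK x t2 + 1 := by simp [pvK]
      have hr : pvR x (x :: t2) = pvR x t2 := by simp [pvR]
      rw [show rleAux x c (x :: t2) = rleAux x (c + 1) t2 by simp [rleAux], ih (c + 1), hk, hr]
      congr 2
      push_cast
      ring
    · have hzb : ((z == x) : Bool) = false := by simpa using fun e => hz e.symm
      have hk : pvK x (z :: t2) = 0 := by simp [pvK, hzb]
      have hr : pvR x (z :: t2) = z :: t2 := by simp [pvR, hzb]
      rw [show rleAux x c (z :: t2) = (x, c) :: rleAux z 1 t2 by simp [rleAux, hz], hk, hr]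
      simp

theorem rleTop_run (x : Int) (t : List Int) (n : Int) :
    rleTop (x :: t) n = (if ((pvK x t + 1 : Nat) : Int) = n then [x] else []) ++ rleTop (pvR x t) n := by
  rw [show rleTop (x :: t) n = ((rleAux x 1 t).filter (fun p => p.2 = n)).map Prod.fst from rfl,
    rle_split x t 1]
  have hc : (1 : Int) + (pvK x t : Int) = ((pvK x t + 1 : Nat) : Int) := by push_cast; ring
  rw [List.filter_cons]
  cases hr : pvR x t with
  | nil =>
    simp only [hc]
    split_ifs with h <;> simp_all [rleTop]
  | cons y t' =>
    simp only [hc]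
    split_ifs with h <;> simp_all [rleTop]

theorem pvBN_eq_rleTop : ∀ (N : Nat) (L : List Int), L.length ≤ N → ∀ n, pvBN L n = rleTop L n := by
  intro N
  induction N with
  | zero =>
    intro L hL n
    have : L = [] := List.length_eq_zero_iff.mp (Nat.le_zero.mp hL)
    subst this
    simp [pvBN, pvAug, pvS, rleTop]
  | succ N ih =>
    intro L hL n
    cases L with
    | nil => simp [pvBN, pvAug, pvS, rleTop]
    | cons x t =>
      rw [pvBN_run, rleTop_run]
      have hr : (pvR x t).length ≤ N := by
        have := List.length_dropWhile_le (fun y => y == x) t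
        simp only [List.length_cons] at hL
        simp only [pvR]
        omega
      rw [ih (pvR x t) hr n]

-- bridge: port B computes pvBN past the guard
theorem alt_eq_BN (L : List Int) (n : Int) (hg : ¬ (L = [] ∨ n ≤ 0)) :
    Extract_Consecutive_alt L n = pvBN L n := by
  unfold Extract_Consecutive_alt
  rw [if_neg hg]
  simp only []
  have hrange : PySem.List.pyRange 0 (L.length : Int) 1
      = (List.range L.length).map (fun k : Nat => (k : Int)) := by
    rw [PySem.List.pyRange_one]
    simp
  rw [hrange, List.filter_map]
  have hcond : ((fun i : Int =>
        (i == 0 || !(PySem.List.pyGetD L i 0 == PySem.List.pyGetD L (i - 1) 0))) ∘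
          (fun k : Nat => (k : Int))) = pvCond L := by
    funext k
    cases k with
    | zero => simp [pvCond]
    | succ j =>
      simp only [Function.comp_apply, pvCond]
      have h0 : ((((j + 1 : Nat) : Int)) == (0 : Int)) = false := by
        simp only [beq_eq_false_iff_ne, ne_eq]
        push_cast
        omega
      have h0' : (((j + 1 : Nat)) == (0 : Nat)) = false := by simp
      have e2 : ((j + 1 : Nat) : Int) - 1 = ((j : Nat) : Int) := by push_cast; ring
      rw [h0, h0', e2, PySem.List.pyGetD_natCast, PySem.List.pyGetD_natCast]
      simp
  rw [hcond]
  have hstarts : ((pvS L).map (fun k : Nat => (k : Int))) ++ [(L.length : Int)]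
      = (pvAug L).map (fun k : Nat => (k : Int)) := by
    simp [pvAug]
  rw [show (List.range L.length).filter (pvCond L) = pvS L from rfl, hstarts]
  rw [← List.map_tail, List.zip_map, List.filter_map, List.map_map]
  have hpred : ((fun p : Int × Int => (p.2 - p.1 == n)) ∘
        Prod.map (fun k : Nat => (k : Int)) (fun k : Nat => (k : Int)))
      = (fun p : Nat × Nat => ((p.2 : Int) - (p.1 : Int) == n)) := by
    funext p
    cases p with
    | mk a b => simp [Prod.map]
  have hval : ((fun p : Int × Int => PySem.List.pyGetD L p.1 0) ∘
        Prod.map (fun k : Nat => (k : Int)) (fun k : Nat => (k : Int)))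
      = (fun p : Nat × Nat => L.getD p.1 0) := by
    funext p
    cases p with
    | mk a b =>
      simp only [Function.comp_apply, Prod.map]
      exact PySem.List.pyGetD_natCast L a 0
  rw [hpred, hval, pvBN]

-- ---- A side (loop characterization) ----
def pvStep (n : Int) (s : List Int × Int) (p : Int × Int) : List Int × Int :=
  if p.2 = p.1 then (s.1, s.2 + 1)
  else ((if s.2 = n then s.1 ++ [p.1] else s.1), 1)

theorem pyGetD_cons_succ (r : List Int) (a : Int) (k : Nat) (d : Int) :
    PySem.List.pyGetD (a :: r) ((k : Int) + 1) d = PySem.List.pyGetD r (k : Int) d := by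
  have h1 : ((k : Int) + 1) = ((k + 1 : Nat) : Int) := by push_cast; ring
  rw [h1, PySem.List.pyGetD_natCast, PySem.List.pyGetD_natCast]
  simp

theorem foldIdx (n d0 : Int) : ∀ (l : List Int) (s : List Int × Int),
    (List.range (l.length - 1)).foldl
        (fun (s : List Int × Int) (k : Nat) => pvStep n s (PySem.List.pyGetD l (k : Int) d0, PySem.List.pyGetD l ((k : Int) + 1) d0)) s
      = (l.zip l.tail).foldl (pvStep n) s := by
  intro l
  induction l with
  | nil => intro s; simp
  | cons h t ih =>
    cases t with
    | nil => intro s; simp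
    | cons x t' =>
      intro s
      have hlen : (h :: x :: t' : List Int).length - 1 = t'.length + 1 := by simp
      rw [hlen, List.range_succ_eq_map, List.foldl_cons, List.foldl_map]
      have h0 : pvStep n s (PySem.List.pyGetD (h :: x :: t') ((0:Nat) : Int) d0,
          PySem.List.pyGetD (h :: x :: t') (((0:Nat) : Int) + 1) d0) = pvStep n s (h, x) := by
        have e1 : (((0:Nat) : Int) + 1) = ((1 : Nat) : Int) := by norm_num
        rw [e1, PySem.List.pyGetD_natCast, PySem.List.pyGetD_natCast]
        simp
      have hfun : (fun (s : List Int × Int) (k : Nat) =>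
            pvStep n s (PySem.List.pyGetD (h :: x :: t') ((k.succ : Nat) : Int) d0,
              PySem.List.pyGetD (h :: x :: t') (((k.succ : Nat) : Int) + 1) d0))
          = (fun (s : List Int × Int) (k : Nat) =>
            pvStep n s (PySem.List.pyGetD (x :: t') ((k : Int)) d0,
              PySem.List.pyGetD (x :: t') ((k : Int) + 1) d0)) := by
        funext s' k
        have e1 : ((k.succ : Nat) : Int) = (k : Int) + 1 := by push_cast; ring
        rw [e1]
        have e2 : ((k : Int) + 1) + 1 = ((k + 1 : Nat) : Int) + 1 := by push_cast; ring
        rw [e2, pyGetD_cons_succ, pyGetD_cons_succ]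
        have e3 : ((k + 1 : Nat) : Int) = (k : Int) + 1 := by omega
        rw [e3]
      rw [h0, hfun]
      have := ih (pvStep n s (h, x))
      simp only [List.length_cons, Nat.add_sub_cancel, List.tail_cons] at this ⊢
      rw [this]
      simp [List.zip_cons_cons]

theorem lastAux (t : List Int) : ∀ h : Int, ((h :: t : List Int).getLast?).getD 0 = t.getLastD h := by
  induction t with
  | nil => intro h; simp
  | cons x t ih =>
    intro h
    rw [List.getLast?_cons_cons, List.getLastD_cons]
    exact ih x

theorem A_pairs (n : Int) : ∀ (t : List Int) (h : Int) (res : List Int) (c : Int),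
    (let st := ((h :: t).zip t).foldl (pvStep n) (res, c);
      if st.2 = n then st.1 ++ [t.getLastD h] else st.1)
      = res ++ ((rleAux h c t).filter (fun p => p.2 = n)).map Prod.fst := by
  intro t
  induction t with
  | nil =>
    intro h res c
    simp only [List.zip_nil_right, List.foldl_nil, rleAux, List.getLastD_nil]
    split_ifs with hc <;> simp [hc]
  | cons x t ih =>
    intro h res c
    by_cases hx : x = h
    · subst hx
      have hstep : pvStep n (res, c) (x, x) = (res, c + 1) := by simp [pvStep]
      simp only [List.zip_cons_cons, List.foldl_cons, hstep, List.getLastD_cons]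
      rw [ih x res (c + 1)]
      simp [rleAux]
    · have hstep : pvStep n (res, c) (h, x) = ((if c = n then res ++ [h] else res), 1) := by
        simp [pvStep, hx]
      simp only [List.zip_cons_cons, List.foldl_cons, hstep, List.getLastD_cons]
      rw [ih x _ 1]
      have hne : ¬ h = x := fun e => hx e.symm
      simp only [rleAux, if_neg hne, List.filter_cons]
      split_ifs with hc <;> simp_all

-- ===== VERDICT (by name: the statement is the Claim_ definition above) =====
theorem Extract_Consecutive_spec : Claim_equal_Extract_Consecutive := by
  unfold Claim_equal_Extract_Consecutive
  intro List_ n _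
  unfold Spec_Extract_Consecutive
  by_cases hg : List_ = [] ∨ n ≤ 0
  · unfold Extract_Consecutive Extract_Consecutive_alt
    simp [hg]
  · rw [alt_eq_BN List_ n hg, pvBN_eq_rleTop List_.length List_ le_rfl n]
    unfold Extract_Consecutive
    simp only [if_neg hg]
    obtain ⟨h, t, rfl⟩ : ∃ h t, List_ = h :: t := by
      cases List_ with
      | nil => exact absurd (Or.inl rfl) hg
      | cons a b => exact ⟨a, b, rfl⟩
    have hrange : PySem.List.pyRange 1 ((h :: t : List Int).length : Int) 1
        = (List.range t.length).map (fun (k : Nat) => (1 : Int) + (k : Int)) := by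
      rw [PySem.List.pyRange_one]
      simp
    rw [hrange, List.foldl_map]
    have hfun : (fun (s : List Int × Int) (k : Nat) =>
          if PySem.List.pyGetD (h :: t) ((1 : Int) + (k : Int)) 0
              = PySem.List.pyGetD (h :: t) ((1 : Int) + (k : Int) - 1) 0 then
            (s.1, s.2 + 1)
          else ((if s.2 = n then s.1 ++ [PySem.List.pyGetD (h :: t) ((1 : Int) + (k : Int) - 1) 0] else s.1), 1))
        = (fun (s : List Int × Int) (k : Nat) =>
          pvStep n s (PySem.List.pyGetD (h :: t) ((k : Int)) 0,
            PySem.List.pyGetD (h :: t) ((k : Int) + 1) 0)) := by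
      funext s k
      have e1 : (1 : Int) + (k : Int) - 1 = (k : Int) := by ring
      have e2 : (1 : Int) + (k : Int) = (k : Int) + 1 := by ring
      rw [e1, e2, pvStep]
    have hlen : t.length = (h :: t : List Int).length - 1 := by simp
    rw [hfun, hlen, foldIdx n 0 (h :: t)]
    have hlast : PySem.List.pyGetD (h :: t) (-1) 0 = t.getLastD h := by
      rw [show PySem.List.pyGetD (h :: t : List Int) (-1) 0
          = (PySem.List.pyGet? (h :: t : List Int) (-1)).getD 0 from rfl,
        PySem.List.pyGet?_neg_one]
      exact lastAux t h
    simp only [List.tail_cons, hlast]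
    rw [show rleTop (h :: t) n = ((rleAux h 1 t).filter (fun p => p.2 = n)).map Prod.fst from rfl]
    exact (A_pairs n t h [] 1).trans (by simp)
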